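-- pv_equiv track=rewrite | github.com/MichaelDeutschCoding/code_wars | car_mileage.py | check
-- ===== SOURCE A (Python) =====
-- def incrementing(s):
--     for i in range(len(s) - 1):
--         if s[i] == '0':
--             return False
--         if s[i] == '9' and s[i+1] == '0':
--             continue
--         if not ord(s[i]) + 1 == ord(s[i+1]):
--             return False
--     return True
--
-- def decrementing(s):
--     for i in range(len(s) - 1):
--         if not ord(s[i]) - 1 == ord(s[i+1]):
--             return False
--     return True
--
-- def zeros(s):
--     for digit in s[1:]:
--         if not digit == '0':
--             return False
--     return True
--
-- def check(number, awesome_phrases):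
--     if number < 100:
--         return False
--     if number in awesome_phrases:
--         return True
--     s = str(number)
--     if incrementing(s):
--         return True
--     if decrementing(s):
--         return True
--     if zeros(s):
--         return True
--     if all(s[i] == s[0] for i in range(len(s))):
--         return True
--     if s == s[::-1]:
--         return True
--     return False
-- ===== SOURCE B (Python) =====
-- def check(number, awesome_phrases):
--     if number < 100:
--         return False
--     if number in awesome_phrases:
--         return True
--     s = str(number)
--     return (s in '1234567890'
--             or s in '9876543210'
--             or s == s[:1] + '0' * (len(s) - 1)
--             or s == s[:1] * len(s)
--             or s == s[::-1])
-- ===== Notes on version B (the rewrite author's own statement) =====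
-- stated objective: idiomatic
-- what changed: Replaces the three index/ord-arithmetic helper loops and the all(...) scan by direct string facts: incrementing/decrementing become substring membership in '1234567890'/'9876543210', trailing-zeros and all-same-digit become comparisons against a constructed string, palindrome stays s == s[::-1].
import Mathlib
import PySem

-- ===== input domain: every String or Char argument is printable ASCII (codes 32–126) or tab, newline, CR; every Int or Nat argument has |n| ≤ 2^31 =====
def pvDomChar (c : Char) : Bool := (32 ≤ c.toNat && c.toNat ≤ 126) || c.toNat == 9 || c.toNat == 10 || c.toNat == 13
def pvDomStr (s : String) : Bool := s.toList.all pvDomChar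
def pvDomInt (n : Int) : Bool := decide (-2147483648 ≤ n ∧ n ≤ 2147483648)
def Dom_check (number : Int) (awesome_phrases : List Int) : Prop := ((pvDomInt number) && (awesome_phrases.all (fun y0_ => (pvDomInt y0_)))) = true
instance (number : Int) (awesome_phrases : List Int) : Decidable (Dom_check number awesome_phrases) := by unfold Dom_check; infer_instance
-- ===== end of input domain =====

-- B replaces A's ord-arithmetic helper loops by substring membership in fixed digit strings and string-construction comparisons (idiomatic; same cost).


-- ===== PORT A =====
-- 'for i in range(len(s)-1)' reads the adjacent pair (s[i], s[i+1]); ported as structural recursion on that pair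
def incrementingA : List Char → Bool
  | a :: b :: rest =>
      if a == '0' then false
      else if a == '9' && b == '0' then incrementingA (b :: rest)
      else if !(a.toNat + 1 == b.toNat) then false
      else incrementingA (b :: rest)
  | _ => true

def decrementingA : List Char → Bool
  | a :: b :: rest =>
      if !((a.toNat : Int) - 1 == (b.toNat : Int)) then false
      else decrementingA (b :: rest)
  | _ => true

-- for digit in s[1:]: if not digit == '0': return False / return True
def zerosA (cs : List Char) : Bool := (PySem.List.slice cs (some 1) none).all (· == '0')

def check (number : Int) (awesome_phrases : List Int) : Bool :=
  if number < 100 then false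
  else if awesome_phrases.contains number then true
  else
    let s := PySem.Int.toChars number
    if incrementingA s then true
    else if decrementingA s then true
    else if zerosA s then true
    else if (PySem.List.pyRange 0 (s.length : Int) 1).all
              (fun i => PySem.List.pyGetD s i ' ' == PySem.List.pyGetD s 0 ' ') then true
    else if s == ((PySem.List.slice? s none none (-1)).getD []) then true
    else false

-- ===== PORT B =====
-- the two constant digit strings '1234567890' and '9876543210' of Source B
def pvInc10 : List Char := ['1','2','3','4','5','6','7','8','9','0']
def pvDec10 : List Char := ['9','8','7','6','5','4','3','2','1','0']

def check_alt (number : Int) (awesome_phrases : List Int) : Bool :=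
  if number < 100 then false
  else if awesome_phrases.contains number then true
  else
    let s := PySem.Int.toChars number
    PySem.Chars.isIn s pvInc10
    || PySem.Chars.isIn s pvDec10
    || s == (PySem.List.slice s none (some 1) ++ List.replicate (s.length - 1) '0')
    || s == (List.replicate s.length (PySem.List.slice s none (some 1))).flatten
    || s == ((PySem.List.slice? s none none (-1)).getD [])

-- ===== PRECONDITION & SPEC =====
def Spec_check (number : Int) (awesome_phrases : List Int) (out : Bool) : Prop := out = check_alt number awesome_phrases
instance (number : Int) (awesome_phrases : List Int) (out : Bool) : Decidable (Spec_check number awesome_phrases out) := by unfold Spec_check; infer_instance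

-- ===== CLAIM (what is proved, stated in full; the proofs are below) =====
def Claim_equal_check : Prop := ∀ (number : Int) (awesome_phrases : List Int), Dom_check number awesome_phrases → Spec_check number awesome_phrases (check number awesome_phrases)

-- ===== LEMMAS AND PROOFS =====
def pvDigits : List Char := ['0','1','2','3','4','5','6','7','8','9']

lemma digitChar_mem : ∀ k < 10, Nat.digitChar k ∈ pvDigits := by decide

lemma toDigitsCore_digits : ∀ (f n : Nat) (l : List Char), (∀ c ∈ l, c ∈ pvDigits) →
    ∀ c ∈ Nat.toDigitsCore 10 f n l, c ∈ pvDigits := by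
  intro f
  induction f with
  | zero => intro n l hl; simpa [Nat.toDigitsCore] using hl
  | succ f ih =>
    intro n l hl c hc
    simp only [Nat.toDigitsCore] at hc
    split at hc
    · rcases List.mem_cons.mp hc with rfl | h
      · exact digitChar_mem _ (Nat.mod_lt _ (by omega))
      · exact hl _ h
    · exact ih (n / 10) _ (by
        intro c' hc'
        rcases List.mem_cons.mp hc' with rfl | h
        · exact digitChar_mem _ (Nat.mod_lt _ (by omega))
        · exact hl _ h) c hc

lemma toChars_digits (n : Int) (hn : 0 ≤ n) : ∀ c ∈ PySem.Int.toChars n, c ∈ pvDigits := by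
  simp only [PySem.Int.toChars, if_neg (by omega : ¬ n < 0)]
  exact toDigitsCore_digits _ _ [] (by simp)

def pvCondI (a b : Char) : Bool := !(a == '0') && ((a == '9' && b == '0') || a.toNat + 1 == b.toNat)
def pvCondD (a b : Char) : Bool := (a.toNat : Int) - 1 == (b.toNat : Int)

lemma incA_step (a b : Char) (l : List Char) :
    incrementingA (a :: b :: l) = (pvCondI a b && incrementingA (b :: l)) := by
  cases h0 : (a == '0') <;> cases h9 : (a == '9' && b == '0') <;>
    cases hn : (a.toNat + 1 == b.toNat) <;>
      simp only [incrementingA, pvCondI, h0, h9, hn] <;> simp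

lemma decA_step (a b : Char) (l : List Char) :
    decrementingA (a :: b :: l) = (pvCondD a b && decrementingA (b :: l)) := by
  cases h : ((a.toNat : Int) - 1 == (b.toNat : Int)) <;>
    simp only [decrementingA, pvCondD, h] <;> simp

lemma L1i : ∀ d ∈ pvDigits, pvInc10.drop (pvInc10.idxOf d) = d :: pvInc10.drop (pvInc10.idxOf d + 1) := by
  intro d hd; fin_cases hd <;> rfl

lemma L2i : ∀ d ∈ pvDigits, ∀ e ∈ pvDigits, pvCondI d e = true → pvInc10.idxOf e = pvInc10.idxOf d + 1 := by
  intro d hd e he; fin_cases hd <;> fin_cases he <;> decide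

lemma L1d : ∀ d ∈ pvDigits, pvDec10.drop (pvDec10.idxOf d) = d :: pvDec10.drop (pvDec10.idxOf d + 1) := by
  intro d hd; fin_cases hd <;> rfl

lemma L2d : ∀ d ∈ pvDigits, ∀ e ∈ pvDigits, pvCondD d e = true → pvDec10.idxOf e = pvDec10.idxOf d + 1 := by
  intro d hd e he; fin_cases hd <;> fin_cases he <;> decide

set_option maxRecDepth 8192 in
lemma incA_all_infix : ∀ x ∈ pvInc10.tails.flatMap List.inits, incrementingA x = true := by decide

set_option maxRecDepth 8192 in
lemma decA_all_infix : ∀ x ∈ pvDec10.tails.flatMap List.inits, decrementingA x = true := by decide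

lemma incA_prefix : ∀ (l : List Char) (d : Char), d ∈ pvDigits → (∀ c ∈ l, c ∈ pvDigits) →
    incrementingA (d :: l) = true → (d :: l) <+: pvInc10.drop (pvInc10.idxOf d) := by
  intro l
  induction l with
  | nil => intro d hd _ _; rw [L1i d hd]; simp
  | cons e l ih =>
    intro d hd hl hrun
    rw [incA_step, Bool.and_eq_true] at hrun
    have he : e ∈ pvDigits := hl e (by simp)
    have ihp := ih e he (fun c hc => hl c (by simp [hc])) hrun.2
    rw [L1i d hd, L2i d hd e he hrun.1] at *
    exact List.cons_prefix_cons.mpr ⟨rfl, ihp⟩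

lemma decA_prefix : ∀ (l : List Char) (d : Char), d ∈ pvDigits → (∀ c ∈ l, c ∈ pvDigits) →
    decrementingA (d :: l) = true → (d :: l) <+: pvDec10.drop (pvDec10.idxOf d) := by
  intro l
  induction l with
  | nil => intro d hd _ _; rw [L1d d hd]; simp
  | cons e l ih =>
    intro d hd hl hrun
    rw [decA_step, Bool.and_eq_true] at hrun
    have he : e ∈ pvDigits := hl e (by simp)
    have ihp := ih e he (fun c hc => hl c (by simp [hc])) hrun.2
    rw [L1d d hd, L2d d hd e he hrun.1] at *
    exact List.cons_prefix_cons.mpr ⟨rfl, ihp⟩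

lemma incA_eq_isIn (cs : List Char) (h : ∀ c ∈ cs, c ∈ pvDigits) :
    incrementingA cs = PySem.Chars.isIn cs pvInc10 := by
  rw [Bool.eq_iff_iff, PySem.Chars.isIn_iff_infix]
  constructor
  · intro hrun
    cases cs with
    | nil => exact List.nil_infix
    | cons d l =>
      have hp := incA_prefix l d (h d (by simp)) (fun c hc => h c (by simp [hc])) hrun
      exact List.infix_iff_prefix_suffix.mpr ⟨_, hp, List.drop_suffix _ _⟩
  · intro hinf
    obtain ⟨t, hpre, hsuf⟩ := List.infix_iff_prefix_suffix.mp hinf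
    exact incA_all_infix cs (List.mem_flatMap.mpr ⟨t, (List.mem_tails _ _).mpr hsuf, (List.mem_inits _ _).mpr hpre⟩)

lemma decA_eq_isIn (cs : List Char) (h : ∀ c ∈ cs, c ∈ pvDigits) :
    decrementingA cs = PySem.Chars.isIn cs pvDec10 := by
  rw [Bool.eq_iff_iff, PySem.Chars.isIn_iff_infix]
  constructor
  · intro hrun
    cases cs with
    | nil => exact List.nil_infix
    | cons d l =>
      have hp := decA_prefix l d (h d (by simp)) (fun c hc => h c (by simp [hc])) hrun
      exact List.infix_iff_prefix_suffix.mpr ⟨_, hp, List.drop_suffix _ _⟩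
  · intro hinf
    obtain ⟨t, hpre, hsuf⟩ := List.infix_iff_prefix_suffix.mp hinf
    exact decA_all_infix cs (List.mem_flatMap.mpr ⟨t, (List.mem_tails _ _).mpr hsuf, (List.mem_inits _ _).mpr hpre⟩)

lemma flatten_replicate_singleton {α : Type} (n : Nat) (c : α) :
    (List.replicate n [c]).flatten = List.replicate n c := by
  induction n with
  | zero => rfl
  | succ n ih => simp [List.replicate_succ, ih]

lemma take_one_cons (c : Char) (t : List Char) :
    PySem.List.slice (c :: t) none (some 1) = [c] := by
  rw [PySem.List.slice_to _ (by omega : (0:Int) ≤ 1)]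
  rfl

lemma zeros_eq (cs : List Char) :
    zerosA cs = (cs == PySem.List.slice cs none (some 1) ++ List.replicate (cs.length - 1) '0') := by
  rw [zerosA, PySem.List.slice_from_one]
  cases cs with
  | nil => rfl
  | cons c t =>
    rw [take_one_cons, Bool.eq_iff_iff]
    simp [List.all_eq_true, List.eq_replicate_iff]

lemma allsame_eq (cs : List Char) :
    ((PySem.List.pyRange 0 (cs.length : Int) 1).all
        (fun i => PySem.List.pyGetD cs i ' ' == PySem.List.pyGetD cs 0 ' '))
      = (cs == (List.replicate cs.length (PySem.List.slice cs none (some 1))).flatten) := by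
  cases cs with
  | nil => rfl
  | cons c t =>
    have hmap := PySem.List.map_pyGetD_pyRange_zero (c :: t) ' '
    rw [PySem.List.len_eq] at hmap
    have h0 : PySem.List.pyGetD (c :: t) 0 ' ' = c := by simp [pysem]
    rw [take_one_cons, flatten_replicate_singleton, h0]
    have hfun : (fun i => PySem.List.pyGetD (c :: t) i ' ' == c)
        = ((· == c) ∘ fun j => PySem.List.pyGetD (c :: t) j ' ') := rfl
    rw [hfun, ← List.all_map, hmap, Bool.eq_iff_iff]
    simp [List.all_eq_true, List.eq_replicate_iff]

lemma ifchain_or (b1 b2 b3 b4 b5 : Bool) :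
    (if b1 then true else if b2 then true else if b3 then true
     else if b4 then true else if b5 then true else false)
    = (b1 || b2 || b3 || b4 || b5) := by
  cases b1 <;> cases b2 <;> cases b3 <;> cases b4 <;> cases b5 <;> simp

-- ===== VERDICT (by name: the statement is the Claim_ definition above) =====
theorem check_spec : Claim_equal_check := by
  intro number awesome_phrases _hdom
  unfold Spec_check check check_alt
  by_cases h1 : number < 100
  · rw [if_pos h1, if_pos h1]
  · rw [if_neg h1, if_neg h1]
    by_cases h2 : awesome_phrases.contains number = true
    · rw [if_pos h2, if_pos h2]
    · rw [if_neg h2, if_neg h2]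
      have hdig := toChars_digits number (by omega)
      show (if incrementingA _ then _ else _) = _
      rw [incA_eq_isIn _ hdig, decA_eq_isIn _ hdig, zeros_eq, allsame_eq, ifchain_or]
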